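-- pv_equiv track=rewrite | github.com/wisebarbie/misc | 202-19F-A4/Chin/construct_patients.py | summarize_gender
-- ===== SOURCE A (Python) =====
-- def summarize_gender(token):
--     m = ['M', 'H', 'B']
--     f = ['F', 'G', 'W']
--     n = ['N']
--
--     if any(char in m for char in token) and not any(char in f for char in token) and not any(char in n for char in token):
--         return m[0]
--     elif any(char in f for char in token):
--         return f[0]
--     else:
--         return 'X'
-- ===== SOURCE B (Python) =====
-- def summarize_gender(token):
--     has_m = has_f = has_n = False
--     for char in token:
--         if char in ('M', 'H', 'B'):
--             has_m = True
--         elif char in ('F', 'G', 'W'):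
--             has_f = True
--         elif char == 'N':
--             has_n = True
--     if has_m and not has_f and not has_n:
--         return 'M'
--     if has_f:
--         return 'F'
--     return 'X'
-- ===== Notes on version B (the rewrite author's own statement) =====
-- stated objective: simpler
-- what changed: Replaces A's three separate any()-scans over the token with a single pass that maintains three boolean flags and then decides M/F/X from them.
import Mathlib
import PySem

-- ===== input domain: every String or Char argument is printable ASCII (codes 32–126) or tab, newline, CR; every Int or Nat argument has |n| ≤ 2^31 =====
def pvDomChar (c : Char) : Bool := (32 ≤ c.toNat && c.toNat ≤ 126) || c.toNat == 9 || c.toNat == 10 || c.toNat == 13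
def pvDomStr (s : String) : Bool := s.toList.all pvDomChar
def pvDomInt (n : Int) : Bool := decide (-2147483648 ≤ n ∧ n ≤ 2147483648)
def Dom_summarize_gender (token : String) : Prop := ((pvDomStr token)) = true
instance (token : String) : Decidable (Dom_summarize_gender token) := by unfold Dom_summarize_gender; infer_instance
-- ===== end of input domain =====

-- B replaces A's three separate any()-scans with one pass maintaining three boolean flags (objective: simpler).

-- ===== PORT A =====
def summarize_gender (token : String) : String :=
  let m : List Char := ['M', 'H', 'B']
  let f : List Char := ['F', 'G', 'W']
  let n : List Char := ['N']
  if (token.toList.any (fun char => m.contains char)) &&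
     !(token.toList.any (fun char => f.contains char)) &&
     !(token.toList.any (fun char => n.contains char)) then
    "M"
  else if token.toList.any (fun char => f.contains char) then
    "F"
  else
    "X"

-- ===== PORT B =====
def summarize_gender_alt (token : String) : String :=
  let flags := token.toList.foldl
    (fun (acc : Bool × Bool × Bool) char =>
      if char = 'M' || char = 'H' || char = 'B' then (true, acc.2.1, acc.2.2)
      else if char = 'F' || char = 'G' || char = 'W' then (acc.1, true, acc.2.2)
      else if char = 'N' then (acc.1, acc.2.1, true)
      else acc)
    (false, false, false)
  if flags.1 && !flags.2.1 && !flags.2.2 then "M"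
  else if flags.2.1 then "F"
  else "X"

-- ===== PRECONDITION & SPEC =====
def Spec_summarize_gender (token : String) (out : String) : Prop := out = summarize_gender_alt token
instance (token : String) (out : String) : Decidable (Spec_summarize_gender token out) := by unfold Spec_summarize_gender; infer_instance

-- ===== CLAIM (what is proved, stated in full; the proofs are below) =====
def Claim_equal_summarize_gender : Prop := ∀ (token : String), Dom_summarize_gender token → Spec_summarize_gender token (summarize_gender token)

-- ===== LEMMAS AND PROOFS =====

lemma pv_flags_eq (l : List Char) (a b c : Bool) :
    l.foldl
      (fun (acc : Bool × Bool × Bool) char =>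
        if char = 'M' || char = 'H' || char = 'B' then (true, acc.2.1, acc.2.2)
        else if char = 'F' || char = 'G' || char = 'W' then (acc.1, true, acc.2.2)
        else if char = 'N' then (acc.1, acc.2.1, true)
        else acc)
      (a, b, c)
    = (a || l.any (fun ch => (['M','H','B'] : List Char).contains ch),
       b || l.any (fun ch => (['F','G','W'] : List Char).contains ch),
       c || l.any (fun ch => (['N'] : List Char).contains ch)) := by
  induction l generalizing a b c with
  | nil => simp
  | cons hd tl ih =>
    simp only [List.foldl_cons, List.any_cons]
    split_ifs with h1 h2 h3 <;> rw [ih]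
    · simp only [Bool.or_eq_true, decide_eq_true_eq] at h1
      rcases h1 with (h | h) | h <;> subst h <;> simp
    · simp only [Bool.or_eq_true, decide_eq_true_eq] at h2
      rcases h2 with (h | h) | h <;> subst h <;> simp
    · subst h3; simp
    · simp only [Bool.or_eq_true, decide_eq_true_eq, not_or] at h1 h2
      obtain ⟨⟨a1, a2⟩, a3⟩ := h1
      obtain ⟨⟨b1, b2⟩, b3⟩ := h2
      simp [a1, a2, a3, b1, b2, b3, h3]

-- ===== VERDICT (by name: the statement is the Claim_ definition above) =====
theorem summarize_gender_spec : Claim_equal_summarize_gender := by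
  intro token _
  unfold Spec_summarize_gender summarize_gender summarize_gender_alt
  simp only [pv_flags_eq, Bool.false_or]
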